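-- pv_equiv track=rewrite | github.com/incnone/AdventOfCode | 2015/day17.py | part_2
-- ===== SOURCE A (Python) =====
-- import itertools
--
-- def part_2(containers):
--     desired_amt = 150
--     num_ways = 0
--     for num in range(len(containers)+1):
--         for perm in itertools.combinations(containers, num):
--             if sum(perm) == desired_amt:
--                 num_ways += 1
--         if num_ways > 0:
--             break
--     return num_ways
-- ===== SOURCE B (Python) =====
-- def part_2(containers):
--     # One include/exclude recursion computing (min subset size, number of ways)
--     # for sum 150 directly, instead of enumerating combinations size by size.
--     def best(items, target):
--         # (min_size, ways) over subsets of items summing to target, or None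
--         if not items:
--             return (0, 1) if target == 0 else None
--         skip = best(items[1:], target)
--         take = best(items[1:], target - items[0])
--         if take is None:
--             return skip
--         take = (take[0] + 1, take[1])
--         if skip is None or take[0] < skip[0]:
--             return take
--         if take[0] == skip[0]:
--             return (skip[0], skip[1] + take[1])
--         return skip
--     r = best(containers, 150)
--     return r[1] if r is not None else 0
-- ===== Notes on version B (the rewrite author's own statement) =====
-- stated objective: alternative
-- what changed: A enumerates all itertools.combinations of each size in increasing order and counts those summing to 150; B is a single include/exclude recursion over the list that computes the pair (minimal subset size, number of subsets of that size) directly, never materialising any combination.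
import Mathlib
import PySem

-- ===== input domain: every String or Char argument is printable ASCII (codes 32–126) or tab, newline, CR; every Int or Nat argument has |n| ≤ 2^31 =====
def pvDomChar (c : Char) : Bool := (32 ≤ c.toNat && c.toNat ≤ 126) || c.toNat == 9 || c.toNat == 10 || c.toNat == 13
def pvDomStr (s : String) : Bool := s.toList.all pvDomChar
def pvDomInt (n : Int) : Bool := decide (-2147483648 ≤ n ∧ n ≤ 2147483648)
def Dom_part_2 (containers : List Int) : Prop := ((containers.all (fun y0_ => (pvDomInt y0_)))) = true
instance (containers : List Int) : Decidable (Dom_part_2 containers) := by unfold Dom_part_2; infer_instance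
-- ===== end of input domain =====

-- B replaces A's size-by-size enumeration of all combinations with one include/exclude
-- recursion computing (minimal subset size, number of ways) directly (objective: alternative).

-- ===== PORT A =====

-- itertools.combinations(xs, k), transliterated structurally
def pvCombos : List Int → Nat → List (List Int)
  | _, 0 => [[]]
  | [], _ + 1 => []
  | x :: rest, k + 1 => (pvCombos rest k).map (fun c => x :: c) ++ pvCombos rest (k + 1)

-- Python's sum(perm)
def pvSum (l : List Int) : Int := l.foldl (fun acc x => acc + x) 0

-- the 'for num in range(...)' loop with its break
def pvLoopA (containers : List Int) (desired : Int) : Int → List Int → Int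
  | acc, [] => acc
  | acc, num :: rest =>
    let acc' := (pvCombos containers num.toNat).foldl
      (fun a perm => if pvSum perm = desired then a + 1 else a) acc
    if acc' > 0 then acc' else pvLoopA containers desired acc' rest

def part_2 (containers : List Int) : Int :=
  pvLoopA containers 150 0 (PySem.List.pyRange 0 (containers.length + 1) 1)

-- ===== PORT B =====

-- best(items, target): (min subset size, number of ways) or none
def pvBest : List Int → Int → Option (Nat × Int)
  | [], t => if t = 0 then some (0, 1) else none
  | x :: rest, t =>
    let skip := pvBest rest t
    match pvBest rest (t - x) with
    | none => skip
    | some (k, w) =>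
      match skip with
      | none => some (k + 1, w)
      | some (k0, w0) =>
        if k + 1 < k0 then some (k + 1, w)
        else if k + 1 = k0 then some (k0, w0 + w)
        else some (k0, w0)

def part_2_alt (containers : List Int) : Int :=
  match pvBest containers 150 with
  | some (_, w) => w
  | none => 0

-- ===== PRECONDITION & SPEC =====
def Spec_part_2 (containers : List Int) (out : Int) : Prop := out = part_2_alt containers
instance (containers : List Int) (out : Int) : Decidable (Spec_part_2 containers out) := by unfold Spec_part_2; infer_instance

-- ===== CLAIM (what is proved, stated in full; the proofs are below) =====
def Claim_equal_part_2 : Prop := ∀ (containers : List Int), Dom_part_2 containers → Spec_part_2 containers (part_2 containers)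

-- ===== LEMMAS AND PROOFS =====

-- number of size-k sublists of xs summing to t
def pvCnt : List Int → Nat → Int → Nat
  | _, 0, t => if t = 0 then 1 else 0
  | [], _ + 1, _ => 0
  | x :: rest, k + 1, t => pvCnt rest k (t - x) + pvCnt rest (k + 1) t

theorem pvSum_eq (l : List Int) : pvSum l = l.sum := by
  have := PySem.List.foldl_add (g := fun x : Int => x) l 0
  simpa [pvSum] using this

theorem pvCnt_zero (xs : List Int) (t : Int) : pvCnt xs 0 t = if t = 0 then 1 else 0 := by
  cases xs <;> rfl

theorem pvCombos_count (xs : List Int) :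
    ∀ (k : Nat) (t : Int),
      (pvCombos xs k).countP (fun p => decide (pvSum p = t)) = pvCnt xs k t := by
  induction xs with
  | nil =>
    intro k t
    cases k with
    | zero => simp [pvCombos, pvCnt, pvSum, eq_comm]
    | succ k => simp [pvCombos, pvCnt]
  | cons x rest ih =>
    intro k t
    cases k with
    | zero => simp [pvCombos, pvCnt, pvSum, eq_comm]
    | succ k =>
      simp only [pvCombos, pvCnt, List.countP_append, List.countP_map]
      rw [← ih k (t - x), ← ih (k + 1) t]
      congr 1
      apply List.countP_congr
      intro c _
      simp only [Function.comp_apply, pvSum_eq, List.sum_cons, decide_eq_true_eq]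
      omega

theorem pvCnt_len {xs : List Int} : ∀ {k : Nat} {t : Int}, pvCnt xs k t ≠ 0 → k ≤ xs.length := by
  induction xs with
  | nil =>
    intro k t h
    cases k with
    | zero => simp
    | succ k => simp [pvCnt] at h
  | cons x rest ih =>
    intro k t h
    cases k with
    | zero => simp
    | succ k =>
      simp only [pvCnt] at h
      rcases Nat.eq_zero_or_pos (pvCnt rest k (t - x)) with h1 | h1
      · have h2 : pvCnt rest (k + 1) t ≠ 0 := by omega
        have := ih h2
        simp only [List.length_cons]
        omega
      · have := ih (k := k) (t := t - x) (by omega)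
        simp only [List.length_cons]
        omega

-- the characterisation pvBest satisfies
def pvGood (xs : List Int) (t : Int) : Option (Nat × Int) → Prop
  | none => ∀ k, pvCnt xs k t = 0
  | some (k, w) => w = (pvCnt xs k t : Int) ∧ pvCnt xs k t ≠ 0 ∧ ∀ j, j < k → pvCnt xs j t = 0

theorem pvBest_good (xs : List Int) : ∀ t : Int, pvGood xs t (pvBest xs t) := by
  induction xs with
  | nil =>
    intro t
    by_cases h : t = 0
    · simp [pvBest, h, pvGood, pvCnt]
    · simp only [pvBest, if_neg h, pvGood]
      intro k
      cases k <;> simp [pvCnt, h]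
  | cons x rest ih =>
    intro t
    have iht := ih t
    have ihx := ih (t - x)
    have hz : pvCnt (x :: rest) 0 t = pvCnt rest 0 t := by
      rw [pvCnt_zero, pvCnt_zero]
    have hs : ∀ j : Nat, pvCnt (x :: rest) (j + 1) t = pvCnt rest j (t - x) + pvCnt rest (j + 1) t :=
      fun j => rfl
    simp only [pvBest]
    cases htk : pvBest rest (t - x) with
    | none =>
      rw [htk] at ihx
      simp only [pvGood] at ihx
      cases hsk : pvBest rest t with
      | none =>
        rw [hsk] at iht; simp only [pvGood] at iht ⊢
        intro k
        cases k with
        | zero => rw [hz]; exact iht 0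
        | succ k => rw [hs]; rw [ihx k, iht (k + 1)]
      | some p =>
        obtain ⟨k0, w0⟩ := p
        rw [hsk] at iht; simp only [pvGood] at iht ⊢
        obtain ⟨hv, hnz, hmin⟩ := iht
        refine ⟨?_, ?_, ?_⟩
        · cases k0 with
          | zero => rw [hz]; exact hv
          | succ k0 => rw [hs, ihx k0]; simpa using hv
        · cases k0 with
          | zero => rw [hz]; exact hnz
          | succ k0 => rw [hs, ihx k0]; simpa using hnz
        · intro j hj
          cases j with
          | zero => rw [hz]; exact hmin 0 hj
          | succ j => rw [hs, ihx j, hmin (j + 1) hj]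
    | some p =>
      obtain ⟨k, w⟩ := p
      rw [htk] at ihx
      simp only [pvGood] at ihx
      obtain ⟨hvx, hnzx, hminx⟩ := ihx
      cases hsk : pvBest rest t with
      | none =>
        rw [hsk] at iht; simp only [pvGood] at iht ⊢
        refine ⟨?_, ?_, ?_⟩
        · rw [hs, iht (k + 1)]; simpa using hvx
        · rw [hs, iht (k + 1)]; simpa using hnzx
        · intro j hj
          cases j with
          | zero => rw [hz]; exact iht 0
          | succ j => rw [hs, iht (j + 1), hminx j (by omega)]
      | some q =>
        obtain ⟨k0, w0⟩ := q
        rw [hsk] at iht; simp only [pvGood] at iht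
        obtain ⟨hv0, hnz0, hmin0⟩ := iht
        by_cases h1 : k + 1 < k0
        · simp only [if_pos h1, pvGood]
          refine ⟨?_, ?_, ?_⟩
          · rw [hs, hmin0 (k + 1) h1]; simpa using hvx
          · rw [hs, hmin0 (k + 1) h1]; simpa using hnzx
          · intro j hj
            cases j with
            | zero => rw [hz]; exact hmin0 0 (by omega)
            | succ j => rw [hs, hminx j (by omega), hmin0 (j + 1) (by omega)]
        · by_cases h2 : k + 1 = k0
          · simp only [if_neg h1, if_pos h2, pvGood]
            refine ⟨?_, ?_, ?_⟩
            · subst h2; rw [hs]; push_cast [hv0, hvx]; ring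
            · subst h2; rw [hs]; omega
            · intro j hj
              exact (by
                cases j with
                | zero => rw [hz]; exact hmin0 0 (by omega)
                | succ j => rw [hs, hminx j (by omega), hmin0 (j + 1) (by omega)])
          · simp only [if_neg h1, if_neg h2, pvGood]
            have hk0 : k0 ≤ k := by omega
            refine ⟨?_, ?_, ?_⟩
            · cases k0 with
              | zero => rw [hz]; exact hv0
              | succ k0 => rw [hs, hminx k0 (by omega)]; simpa using hv0
            · cases k0 with
              | zero => rw [hz]; exact hnz0
              | succ k0 => rw [hs, hminx k0 (by omega)]; simpa using hnz0
            · intro j hj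
              cases j with
              | zero => rw [hz]; exact hmin0 0 hj
              | succ j => rw [hs, hminx j (by omega), hmin0 (j + 1) hj]

-- A's loop returns the count at the first num whose count is nonzero, else 0
theorem pvLoopA_eq_find (xs : List Int) (t : Int) :
    ∀ nums : List Int,
      pvLoopA xs t 0 nums =
        match nums.find? (fun num => pvCnt xs num.toNat t != 0) with
        | some num => (pvCnt xs num.toNat t : Int)
        | none => 0 := by
  intro nums
  induction nums with
  | nil => rfl
  | cons num rest ih =>
    have hacc : (pvCombos xs num.toNat).foldl
        (fun a perm => if pvSum perm = t then a + 1 else a) 0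
        = (pvCnt xs num.toNat t : Int) := by
      rw [PySem.List.foldl_ite_add_one (p := fun perm => pvSum perm = t)]
      rw [pvCombos_count]
      simp
    by_cases h : pvCnt xs num.toNat t = 0
    · rw [List.find?_cons_of_neg (by simp [h])]
      simp only [pvLoopA, hacc, h, Nat.cast_zero]
      rw [if_neg (by omega)]
      exact ih
    · rw [List.find?_cons_of_pos (by simp [h])]
      simp only [pvLoopA, hacc]
      rw [if_pos (by exact_mod_cast Nat.pos_of_ne_zero h)]

theorem pyRange_zero_nat (m : Nat) :
    PySem.List.pyRange 0 (m : Int) 1 = List.map (fun k : Nat => (k : Int)) (List.range m) := by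
  rw [PySem.List.pyRange_one]
  simp only [Int.sub_zero, Int.toNat_natCast, zero_add]

theorem find?_range_eq_some {p : Nat → Bool} {m k : Nat} (hk : k < m)
    (hmin : ∀ j, j < k → p j = false) (hp : p k = true) :
    (List.range m).find? p = some k := by
  induction m with
  | zero => omega
  | succ m ih =>
    rw [List.range_succ, List.find?_append]
    by_cases h : k < m
    · rw [ih h]; rfl
    · have hkm : k = m := by omega
      subst hkm
      have hnone : (List.range k).find? p = none := by
        rw [List.find?_eq_none]
        intro j hj
        simp only [List.mem_range] at hj
        simp [hmin j hj]
      rw [hnone]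
      simp [hp]

theorem find?_range_eq_none {p : Nat → Bool} {m : Nat} (h : ∀ j, p j = false) :
    (List.range m).find? p = none := by
  rw [List.find?_eq_none]; intro j _; simp [h j]

-- ===== VERDICT (by name: the statement is the Claim_ definition above) =====
theorem part_2_spec : Claim_equal_part_2 := by
  intro containers _
  unfold Spec_part_2 part_2 part_2_alt
  rw [pvLoopA_eq_find]
  have hrange : PySem.List.pyRange 0 ((containers.length : Int) + 1) 1
      = List.map (fun k : Nat => (k : Int)) (List.range (containers.length + 1)) := by
    rw [show ((containers.length : Int) + 1) = (((containers.length + 1 : Nat)) : Int) by push_cast; ring]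
    exact pyRange_zero_nat _
  rw [hrange, List.find?_map]
  have hcomp : ((fun num : Int => pvCnt containers num.toNat 150 != 0) ∘ (fun k : Nat => (k : Int)))
      = fun j : Nat => pvCnt containers j 150 != 0 := by
    funext j; simp
  rw [hcomp]
  have hgood := pvBest_good containers 150
  cases hb : pvBest containers 150 with
  | none =>
    rw [hb] at hgood
    simp only [pvGood] at hgood
    rw [find?_range_eq_none (fun j => by simp [hgood])]
    rfl
  | some p =>
    obtain ⟨k, w⟩ := p
    rw [hb] at hgood
    simp only [pvGood] at hgood
    obtain ⟨hv, hnz, hmin⟩ := hgood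
    have hklen : k ≤ containers.length := pvCnt_len hnz
    rw [find?_range_eq_some (k := k) (by omega)
      (fun j hj => by simp [hmin j hj]) (by simp [hnz])]
    simp [hv]
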